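-- pv_equiv track=rewrite | github.com/LivingLogic/LivingLogic.Python.xist | src/ll/toxicc.py | _stringifyoracle
-- ===== SOURCE A (Python) =====
-- def _stringifyoracle(string, nchar=False):
-- 	"""
-- 	Format :obj:`string` as multiple PL/SQL string constants or expressions.
-- 	:obj:`nchar` specifies if a ``NVARCHAR`` constant should be generated or a
-- 	``VARCHAR``. This is a generator.
-- 	"""
-- 	current = []
--
-- 	for c in string:
-- 		if ord(c) < 32:
-- 			if current:
-- 				current = "".join(current)
-- 				if nchar:
-- 					yield f"N'{current}'"
-- 				else:
-- 					yield f"'{current}'"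
-- 				current = []
-- 			yield f"chr({ord(c)})"
-- 		else:
-- 			if c == "'":
-- 				c = "''"
-- 			current.append(c)
-- 			if len(current) > 1000:
-- 				current = "".join(current)
-- 				if nchar:
-- 					yield f"N'{current}'"
-- 				else:
-- 					yield f"'{current}'"
-- 				current = []
-- 	if current:
-- 		current = "".join(current)
-- 		if nchar:
-- 			yield f"N'{current}'"
-- 		else:
-- 			yield f"'{current}'"
-- ===== SOURCE B (Python) =====
-- def _stringifyoracle(string, nchar=False):
-- 	"""
-- 	Format :obj:`string` as multiple PL/SQL string constants or expressions.
-- 	This is a generator.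
-- 	"""
-- 	q = "N'" if nchar else "'"
-- 	i = 0
-- 	n = len(string)
-- 	while i < n:
-- 		if ord(string[i]) < 32:
-- 			j = i
-- 			while j < n and ord(string[j]) < 32:
-- 				j += 1
-- 			for c in string[i:j]:
-- 				yield f"chr({ord(c)})"
-- 		else:
-- 			j = i
-- 			while j < n and ord(string[j]) >= 32:
-- 				j += 1
-- 			esc = ["''" if c == "'" else c for c in string[i:j]]
-- 			for k in range(0, len(esc), 1001):
-- 				yield q + "".join(esc[k:k + 1001]) + "'"
-- 		i = j
-- ===== Notes on version B (the rewrite author's own statement) =====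
-- stated objective: alternative
-- what changed: Replaces A's single stateful accumulator loop (flush-on-overflow/control) by run-splitting: the string is cut into maximal control/printable runs, control runs are emitted char by char, printable runs are escaped once and sliced into 1001-element chunks.
import Mathlib
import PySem

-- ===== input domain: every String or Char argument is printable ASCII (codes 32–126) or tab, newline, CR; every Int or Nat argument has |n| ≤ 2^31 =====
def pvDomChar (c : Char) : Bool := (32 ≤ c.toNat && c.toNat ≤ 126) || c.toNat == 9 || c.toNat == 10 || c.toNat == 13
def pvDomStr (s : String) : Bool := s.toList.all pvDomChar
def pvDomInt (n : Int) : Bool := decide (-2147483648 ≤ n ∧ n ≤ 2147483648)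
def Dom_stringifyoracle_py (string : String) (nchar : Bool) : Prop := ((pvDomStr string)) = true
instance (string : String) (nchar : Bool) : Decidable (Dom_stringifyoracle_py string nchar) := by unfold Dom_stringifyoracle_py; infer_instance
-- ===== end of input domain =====

-- B replaces A's stateful accumulator loop by run-splitting (maximal control/printable
-- runs; printable runs escaped then sliced into 1001-element chunks): alternative
-- decomposition, same cost; equivalence is proved on all inputs.

-- shared helpers (the literal pieces both Pythons build)
def pvChr (c : Char) : String := "chr(" ++ PySem.Int.toStr (c.toNat : Int) ++ ")"
def pvEsc (c : Char) : String := if c = '\'' then "''" else String.ofList [c]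
def pvWrap (nchar : Bool) (cur : List String) : String :=
  (if nchar then "N'" else "'") ++ String.join cur ++ "'"

-- ===== PORT A =====
-- A's loop: state `cur` = list of escaped elements; flushed on control char, on
-- overflow past 1000 elements, and at the end.
def pvALoop (nchar : Bool) : List Char → List String → List String
  | [], cur => if cur ≠ [] then [pvWrap nchar cur] else []
  | c :: rest, cur =>
    if c.toNat < 32 then
      (if cur ≠ [] then [pvWrap nchar cur] else []) ++ (pvChr c :: pvALoop nchar rest [])
    else
      let cur' := cur ++ [pvEsc c]
      if cur'.length > 1000 then pvWrap nchar cur' :: pvALoop nchar rest []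
      else pvALoop nchar rest cur'

def stringifyoracle_py (string : String) (nchar : Bool) : List String :=
  pvALoop nchar string.toList []

-- ===== PORT B =====
-- B: slice an escaped-element list into consecutive 1001-element chunks
def pvChunks (nchar : Bool) : List String → List String
  | [] => []
  | a :: t => pvWrap nchar ((a :: t).take 1001) :: pvChunks nchar ((a :: t).drop 1001)
  termination_by l => l.length
  decreasing_by simp [List.length_drop]

-- B: split into maximal control / printable runs and emit each run's output
def pvBLoop (nchar : Bool) (l : List Char) : List String :=
  match l with
  | [] => []
  | c :: rest =>
    if c.toNat < 32 then
      ((c :: rest).takeWhile (fun d => decide (d.toNat < 32))).map pvChr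
        ++ pvBLoop nchar ((c :: rest).dropWhile (fun d => decide (d.toNat < 32)))
    else
      pvChunks nchar (((c :: rest).takeWhile (fun d => decide (32 ≤ d.toNat))).map pvEsc)
        ++ pvBLoop nchar ((c :: rest).dropWhile (fun d => decide (32 ≤ d.toNat)))
  termination_by l.length
  decreasing_by
  · simp only [List.dropWhile_cons]
    split
    · exact Nat.lt_succ_of_le (List.length_dropWhile_le _ _)
    · simp_all
  · simp only [List.dropWhile_cons]
    split
    · exact Nat.lt_succ_of_le (List.length_dropWhile_le _ _)
    · simp_all

def stringifyoracle_py_alt (string : String) (nchar : Bool) : List String :=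
  pvBLoop nchar string.toList

-- ===== PRECONDITION & SPEC =====
def Spec_stringifyoracle_py (string : String) (nchar : Bool) (out : List String) : Prop := out = stringifyoracle_py_alt string nchar
instance (string : String) (nchar : Bool) (out : List String) : Decidable (Spec_stringifyoracle_py string nchar out) := by unfold Spec_stringifyoracle_py; infer_instance

-- ===== CLAIM (what is proved, stated in full; the proofs are below) =====
def Claim_equal_stringifyoracle_py : Prop := ∀ (string : String) (nchar : Bool), Dom_stringifyoracle_py string nchar → Spec_stringifyoracle_py string nchar (stringifyoracle_py string nchar)

-- ===== LEMMAS AND PROOFS =====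

theorem pvChunks_nil (nchar : Bool) : pvChunks nchar [] = [] := by
  simp [pvChunks]

theorem pvChunks_cons (nchar : Bool) (a : String) (t : List String) :
    pvChunks nchar (a :: t)
      = pvWrap nchar ((a :: t).take 1001) :: pvChunks nchar ((a :: t).drop 1001) := by
  simp [pvChunks]

theorem pvBLoop_nil (nchar : Bool) : pvBLoop nchar [] = [] := by
  simp [pvBLoop]

-- B's semantics with a carried-in partial chunk `cur` (proof device)
def pvCarry (nchar : Bool) (cur : List String) (l : List Char) : List String :=
  match l with
  | [] => pvChunks nchar cur
  | c :: rest =>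
    if c.toNat < 32 then pvChunks nchar cur ++ pvBLoop nchar (c :: rest)
    else
      pvChunks nchar (cur ++ ((c :: rest).takeWhile (fun d => decide (32 ≤ d.toNat))).map pvEsc)
        ++ pvBLoop nchar ((c :: rest).dropWhile (fun d => decide (32 ≤ d.toNat)))

theorem pvChunks_small (nchar : Bool) (cur : List String) (h : cur.length ≤ 1001) :
    pvChunks nchar cur = if cur ≠ [] then [pvWrap nchar cur] else [] := by
  cases cur with
  | nil => simp [pvChunks_nil]
  | cons a t =>
    rw [pvChunks_cons]
    simp only [List.take_of_length_le h, List.drop_eq_nil_of_le h, pvChunks_nil]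
    simp

theorem pvBLoop_ctrl_cons (nchar : Bool) (c : Char) (rest : List Char)
    (hc : c.toNat < 32) : pvBLoop nchar (c :: rest) = pvChr c :: pvBLoop nchar rest := by
  rw [pvBLoop]
  simp only [if_pos hc, List.takeWhile_cons, List.dropWhile_cons, decide_eq_true hc, if_pos,
    List.map_cons, List.cons_append]
  cases rest with
  | nil => simp [pvBLoop_nil]
  | cons d r =>
    by_cases hd : d.toNat < 32
    · rw [pvBLoop, if_pos hd]
    · simp [hd]

theorem pvBLoop_chunk_split (nchar : Bool) (rest : List Char) :
    pvBLoop nchar rest =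
      pvChunks nchar ((rest.takeWhile (fun d => decide (32 ≤ d.toNat))).map pvEsc)
        ++ pvBLoop nchar (rest.dropWhile (fun d => decide (32 ≤ d.toNat))) := by
  cases rest with
  | nil => simp [pvBLoop_nil, pvChunks_nil]
  | cons d r =>
    by_cases hd : d.toNat < 32
    · have h1 : ¬ (32 ≤ d.toNat) := by omega
      simp [h1, pvChunks_nil]
    · rw [pvBLoop]; simp [hd]

theorem pvCarry_nil_eq (nchar : Bool) (l : List Char) :
    pvCarry nchar [] l = pvBLoop nchar l := by
  cases l with
  | nil => simp [pvCarry, pvBLoop_nil, pvChunks_nil]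
  | cons c rest =>
    by_cases hc : c.toNat < 32
    · simp [pvCarry, hc, pvChunks_nil]
    · rw [pvCarry, pvBLoop]
      simp [hc]

theorem pvALoop_eq_carry (nchar : Bool) (l : List Char) :
    ∀ cur : List String, cur.length ≤ 1000 →
      pvALoop nchar l cur = pvCarry nchar cur l := by
  induction l with
  | nil =>
    intro cur h
    rw [pvALoop, pvCarry, pvChunks_small nchar cur (by omega)]
  | cons c rest ih =>
    intro cur h
    by_cases hc : c.toNat < 32
    · rw [pvALoop, pvCarry]
      simp only [if_pos hc, ih [] (by simp), pvCarry_nil_eq,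
        pvChunks_small nchar cur (by omega), pvBLoop_ctrl_cons nchar c rest hc]
    · have h32 : 32 ≤ c.toNat := by omega
      rw [pvALoop, pvCarry]
      simp only [if_neg hc, List.takeWhile_cons, List.dropWhile_cons, decide_eq_true h32,
        if_pos, List.map_cons]
      by_cases hlen : (cur ++ [pvEsc c]).length > 1000
      · have hcur : cur.length = 1000 := by simp at hlen h; omega
        rw [if_pos hlen, ih [] (by simp), pvCarry_nil_eq]
        have hfull : cur ++ pvEsc c :: (rest.takeWhile (fun d => decide (32 ≤ d.toNat))).map pvEsc
            = (cur ++ [pvEsc c]) ++ (rest.takeWhile (fun d => decide (32 ≤ d.toNat))).map pvEsc := by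
          simp
        rw [hfull]
        have hne : ∃ a t, (cur ++ [pvEsc c]) ++ (rest.takeWhile (fun d => decide (32 ≤ d.toNat))).map pvEsc = a :: t := by
          cases hx : (cur ++ [pvEsc c]) ++ (rest.takeWhile (fun d => decide (32 ≤ d.toNat))).map pvEsc with
          | nil => exact absurd (congrArg List.length hx) (by simp)
          | cons a t => exact ⟨a, t, rfl⟩
        obtain ⟨a, t, hx⟩ := hne
        rw [hx, pvChunks_cons, ← hx]
        have hlen' : (cur ++ [pvEsc c]).length = 1001 := by simp; omega
        rw [List.take_left' hlen', List.drop_left' hlen']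
        rw [pvBLoop_chunk_split nchar rest]
        simp
      · rw [if_neg hlen, ih (cur ++ [pvEsc c]) (by simp at hlen ⊢; omega)]
        cases rest with
        | nil => simp [pvCarry, pvBLoop_nil]
        | cons d r =>
          by_cases hd : d.toNat < 32
          · have h1 : ¬ (32 ≤ d.toNat) := by omega
            rw [pvCarry]
            simp [hd, h1]
          · have h32d : 32 ≤ d.toNat := by omega
            rw [pvCarry]
            simp [hd, h32d]

-- ===== VERDICT (by name: the statement is the Claim_ definition above) =====
theorem stringifyoracle_py_spec : Claim_equal_stringifyoracle_py := by
  intro s nchar _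
  unfold Spec_stringifyoracle_py stringifyoracle_py stringifyoracle_py_alt
  rw [pvALoop_eq_carry nchar s.toList [] (by simp), pvCarry_nil_eq]
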